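-- pv_equiv track=rewrite | github.com/terrysimons/mos6502 | tests/c64/drive/test_save.py | create_basic_program_of_size
-- ===== SOURCE A (Python) =====
-- def create_basic_program_of_size(target_bytes: int) -> str:
--     """Generate BASIC code that creates a program of approximately the target size.
--
--     Each BASIC line takes approximately:
--     - 4 bytes overhead (next line ptr + line number)
--     - Plus the tokenized statement length
--
--     A line like '10 REM AAAA...' takes: 4 + 1 (REM token) + padding = ~5 + padding bytes
--
--     Returns BASIC commands to type that will create a program of the target size.
--     """
--     if target_bytes <= 0:
--         return ""
--
--     # BASIC program structure:
--     # Each line: 2 bytes next ptr, 2 bytes line num, tokenized code, 0 terminator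
--     # Program ends with 0x00 0x00 (null next ptr)
--     # So minimum program with one line: ~8 bytes
--
--     # For simple sizing, we'll use lines of REM statements
--     # REM token is $8F, followed by text
--     # Line overhead: 5 bytes (2 ptr + 2 linenum + 1 terminator)
--     # REM adds 1 byte for token
--
--     # For a program of N bytes, we need content of about N-2 bytes (for final 00 00)
--     content_needed = target_bytes - 2
--
--     if content_needed <= 0:
--         return ""
--
--     commands = []
--     line_num = 10
--     bytes_added = 0
--
--     while bytes_added < content_needed:
--         # Each line: 5 overhead + 1 REM token + padding text
--         # Keep lines under ~80 chars for keyboard buffer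
--         remaining = content_needed - bytes_added
--         # Line overhead is ~6 bytes, so text length determines size
--         text_len = min(remaining - 6, 60)  # Max 60 chars of text per line
--         if text_len < 1:
--             text_len = 1
--
--         # Use 'A' repeated for padding text
--         padding = 'A' * text_len
--         commands.append(f'{line_num} REM {padding}\r')
--
--         # Estimate bytes: 5 overhead + 1 REM + space + text_len
--         bytes_added += 6 + text_len + 1
--         line_num += 10
--
--     return commands
-- ===== SOURCE B (Python) =====
-- def create_basic_program_of_size(target_bytes: int) -> str:
--     """Closed-form rewrite: each full REM line consumes 67 bytes; compute the
--     number of full lines and the trailing line's text length directly."""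
--     if target_bytes <= 0:
--         return ""
--     content_needed = target_bytes - 2
--     if content_needed <= 0:
--         return ""
--     full_lines = (content_needed + 1) // 67
--     leftover = content_needed - 67 * full_lines
--     commands = [f'{10 * (i + 1)} REM {"A" * 60}\r' for i in range(full_lines)]
--     if leftover > 0:
--         commands.append(f'{10 * (full_lines + 1)} REM {"A" * max(leftover - 6, 1)}\r')
--     return commands
-- ===== Notes on version B (the rewrite author's own statement) =====
-- stated objective: faster
-- what changed: Replaced A's accumulator while-loop (one iteration per emitted line, tracking bytes_added) by closed-form arithmetic: the number of full 67-byte lines is (content_needed+1)//67 and the trailing line's text length is max(leftover-6,1), with the lines built by a single comprehension.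
-- outside the precondition, e.g. on create_basic_program_of_size(0): A returns '', B returns ''; on create_basic_program_of_size(2): A returns '', B returns ''
import Mathlib
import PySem

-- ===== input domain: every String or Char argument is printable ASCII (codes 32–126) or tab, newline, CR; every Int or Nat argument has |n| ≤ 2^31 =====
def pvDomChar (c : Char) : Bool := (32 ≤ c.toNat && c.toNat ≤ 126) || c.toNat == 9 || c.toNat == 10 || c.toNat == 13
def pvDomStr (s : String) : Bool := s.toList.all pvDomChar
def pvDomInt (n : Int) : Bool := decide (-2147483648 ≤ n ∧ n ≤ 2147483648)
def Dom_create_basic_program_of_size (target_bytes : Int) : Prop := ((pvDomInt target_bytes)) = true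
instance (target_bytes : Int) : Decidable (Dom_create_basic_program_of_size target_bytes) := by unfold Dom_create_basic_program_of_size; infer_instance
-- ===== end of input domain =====

-- B replaces A's accumulator loop by closed-form arithmetic: the number of full 60-char
-- REM lines and the trailing line's text length are computed directly (objective: faster).


-- f'{line_num} REM {padding}\r' with padding = 'A' * text_len (shared f-string shape)
def pvRemLine (line_num text_len : Int) : String :=
  PySem.Int.toStr line_num ++ " REM " ++ String.ofList (List.replicate text_len.toNat 'A') ++ "\r"

-- ===== PORT A =====
-- text_len = min(remaining - 6, 60); if text_len < 1: text_len = 1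
def pvTextLen (remaining : Int) : Int :=
  if min (remaining - 6) 60 < 1 then 1 else min (remaining - 6) 60

lemma one_le_pvTextLen (r : Int) : 1 ≤ pvTextLen r := by
  unfold pvTextLen; split <;> omega

-- A's while-loop over state (line_num, bytes_added); cited for termination: each
-- iteration adds 6 + text_len + 1 ≥ 8 to bytes_added.
def pvALoop (content_needed line_num bytes_added : Int) : List String :=
  if bytes_added < content_needed then
    pvRemLine line_num (pvTextLen (content_needed - bytes_added)) ::
      pvALoop content_needed (line_num + 10)
        (bytes_added + 6 + pvTextLen (content_needed - bytes_added) + 1)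
  else []
termination_by (content_needed - bytes_added).toNat
decreasing_by have := one_le_pvTextLen (content_needed - bytes_added); omega

-- Python A returns the string "" (not a list) when target_bytes ≤ 2; that branch is
-- outside Pre_ below and is rendered here as [].
def create_basic_program_of_size (target_bytes : Int) : List String :=
  if target_bytes ≤ 0 then []
  else
    let content_needed := target_bytes - 2
    if content_needed ≤ 0 then []
    else pvALoop content_needed 10 0

-- ===== PORT B =====
def create_basic_program_of_size_alt (target_bytes : Int) : List String :=
  if target_bytes ≤ 0 then []
  else
    let content_needed := target_bytes - 2
    if content_needed ≤ 0 then []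
    else
      let full_lines := PySem.Int.floordiv (content_needed + 1) 67
      let leftover := content_needed - 67 * full_lines
      let commands := (PySem.List.pyRange 0 full_lines 1).map
        (fun i => pvRemLine (10 * (i + 1)) 60)
      if leftover > 0 then
        commands ++ [pvRemLine (10 * (full_lines + 1)) (max (leftover - 6) 1)]
      else commands

-- ===== PRECONDITION & SPEC =====
-- Pre_ excludes target_bytes ≤ 2, where Python A (and B) return the string "" instead of
-- a value of the declared list-of-strings return type.
def Pre_create_basic_program_of_size (target_bytes : Int) : Prop := 2 < target_bytes
instance (target_bytes : Int) : Decidable (Pre_create_basic_program_of_size target_bytes) := by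
  unfold Pre_create_basic_program_of_size; infer_instance
def pvWitness_create_basic_program_of_size : Int := (10)

def Spec_create_basic_program_of_size (target_bytes : Int) (out : List String) : Prop := out = create_basic_program_of_size_alt target_bytes
instance (target_bytes : Int) (out : List String) : Decidable (Spec_create_basic_program_of_size target_bytes out) := by unfold Spec_create_basic_program_of_size; infer_instance

-- ===== CLAIM (what is proved, stated in full; the proofs are below) =====
def Claim_equal_create_basic_program_of_size : Prop := ∀ (target_bytes : Int), Dom_create_basic_program_of_size target_bytes → Pre_create_basic_program_of_size target_bytes → Spec_create_basic_program_of_size target_bytes (create_basic_program_of_size target_bytes)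

-- ===== LEMMAS AND PROOFS =====

-- A's loop as a function of remaining = content_needed - bytes_added (proof-only).
def pvG (r ln : Int) : List String :=
  if 66 ≤ r then pvRemLine ln 60 :: pvG (r - 67) (ln + 10)
  else if 0 < r then [pvRemLine ln (max (r - 6) 1)] else []
termination_by r.toNat
decreasing_by omega

lemma pvALoop_eq_pvG : ∀ (n : Nat) (c ln ba : Int), (c - ba).toNat ≤ n →
    pvALoop c ln ba = pvG (c - ba) ln := by
  intro n
  induction n with
  | zero =>
    intro c ln ba h
    rw [pvALoop.eq_def, pvG.eq_def]
    simp [show ¬ ba < c by omega, show ¬ (66 ≤ c - ba) by omega]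
  | succ n ih =>
    intro c ln ba h
    rw [pvALoop.eq_def, pvG.eq_def]
    by_cases hlt : ba < c
    · by_cases hbig : 66 ≤ c - ba
      · have htl : pvTextLen (c - ba) = 60 := by unfold pvTextLen; omega
        simp only [hlt, if_pos, hbig, htl]
        congr 1
        rw [ih c (ln + 10) (ba + 6 + 60 + 1) (by omega)]
        congr 1; omega
      · have h0 : 0 < c - ba := by omega
        have htl : pvTextLen (c - ba) = max (c - ba - 6) 1 := by unfold pvTextLen; omega
        simp only [hlt, if_pos, hbig, if_neg, not_false_iff, h0, htl]
        congr 1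
        rw [ih c (ln + 10) (ba + 6 + max (c - ba - 6) 1 + 1) (by omega), pvG.eq_def,
          if_neg (by omega), if_neg (by omega)]
    · simp [hlt, show ¬ (66 ≤ c - ba) by omega]

-- pvG in closed form: q full 60-char lines, then an optional trailing line.
lemma pvG_closed : ∀ (q : Nat) (r ln : Int), 0 < r → (q : Int) = PySem.Int.floordiv (r + 1) 67 →
    pvG r ln = (List.range q).map (fun (i : Nat) => pvRemLine (ln + 10 * (i : Int)) 60) ++
      (if 0 < r - 67 * (q : Int) then [pvRemLine (ln + 10 * (q : Int)) (max (r - 67 * (q : Int) - 6) 1)] else []) := by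
  intro q
  induction q with
  | zero =>
    intro r ln hr hq
    have hb : ¬ (66 ≤ r) := by
      intro hb
      have := (PySem.Int.le_floordiv_iff_mul_le (a := r + 1) (b := 67) (q := 1) (by omega)).mpr (by omega)
      omega
    rw [pvG.eq_def, if_neg hb, if_pos hr]
    push_cast
    rw [if_pos (by omega)]
    norm_num
  | succ q ih =>
    intro r ln hr hq
    have hge : (q : Int) + 1 ≤ PySem.Int.floordiv (r + 1) 67 := by push_cast at hq ⊢; omega
    have hlow : ((q : Int) + 1) * 67 ≤ r + 1 :=
      (PySem.Int.le_floordiv_iff_mul_le (by omega)).mp hge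
    have hbig : 66 ≤ r := by nlinarith [Int.natCast_nonneg q]
    by_cases h0 : 0 < r - 67
    · have hub : PySem.Int.floordiv (r + 1) 67 * 67 + PySem.Int.mod (r + 1) 67 = r + 1 :=
        PySem.Int.floordiv_mul_add_mod _ _
      have hub' : PySem.Int.floordiv (r - 67 + 1) 67 * 67 + PySem.Int.mod (r - 67 + 1) 67 = r - 67 + 1 :=
        PySem.Int.floordiv_mul_add_mod _ _
      have m1 := PySem.Int.mod_nonneg (r + 1) (b := 67) (by omega)
      have m1' := PySem.Int.mod_lt (r + 1) (b := 67) (by omega)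
      have m2 := PySem.Int.mod_nonneg (r - 67 + 1) (b := 67) (by omega)
      have m2' := PySem.Int.mod_lt (r - 67 + 1) (b := 67) (by omega)
      have hq' : (q : Int) = PySem.Int.floordiv (r - 67 + 1) 67 := by push_cast at hq; omega
      rw [pvG.eq_def, if_pos hbig, ih (r - 67) (ln + 10) h0 hq', List.range_succ_eq_map]
      simp only [List.map_cons, Nat.cast_zero, mul_zero, add_zero, List.map_map,
        Function.comp_def, List.cons_append]
      congr 1
      push_cast
      congr 1
      · exact List.map_congr_left (fun i _ => by ring_nf)
      · rw [show r - 67 - 67 * (q : Int) = r - 67 * ((q : Int) + 1) from by ring,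
            show ln + 10 + 10 * (q : Int) = ln + 10 * ((q : Int) + 1) from by ring]
    · -- 66 ≤ r ≤ 67 force q = 0; both sides are the single full line.
      have hub : PySem.Int.floordiv (r + 1) 67 < 2 := by
        rw [PySem.Int.floordiv_lt_iff_lt_mul (by omega)]; omega
      have hq0 : q = 0 := by push_cast at hq; omega
      subst hq0
      rw [pvG.eq_def, if_pos hbig, pvG.eq_def, if_neg (by omega), if_neg (by omega)]
      push_cast
      rw [if_neg (by omega)]
      simp

-- ===== VERDICT (by name: the statement is the Claim_ definition above) =====
theorem create_basic_program_of_size_spec : Claim_equal_create_basic_program_of_size := by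
  intro tb _ hpre
  unfold Pre_create_basic_program_of_size at hpre
  unfold Spec_create_basic_program_of_size
  unfold create_basic_program_of_size create_basic_program_of_size_alt
  simp only [show ¬ tb ≤ 0 by omega, if_neg, not_false_iff, show ¬ tb - 2 ≤ 0 by omega]
  set c := tb - 2 with hc
  have hcpos : 0 < c := by omega
  set q := PySem.Int.floordiv (c + 1) 67 with hqdef
  have hqnn : 0 ≤ q := by
    rw [hqdef]
    have := (PySem.Int.le_floordiv_iff_mul_le (a := c + 1) (b := 67) (q := 0) (by omega)).mpr (by omega)
    omega
  have hln : pvALoop c 10 0 = pvG c 10 := by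
    have := pvALoop_eq_pvG (c - 0).toNat c 10 0 le_rfl
    simpa using this
  rw [hln, pvG_closed q.toNat c 10 hcpos (by rw [Int.toNat_of_nonneg hqnn])]
  rw [PySem.List.pyRange_one]
  simp only [List.map_map, Function.comp_def, sub_zero, zero_add]
  rw [Int.toNat_of_nonneg hqnn]
  by_cases ht : 0 < c - 67 * q
  · rw [if_pos ht, if_pos ht]
    congr 1
    · exact List.map_congr_left (fun i _ => by ring_nf)
    · rw [show 10 * (q + 1) = 10 + 10 * q from by ring]
  · rw [if_neg ht, if_neg ht, List.append_nil]
    exact List.map_congr_left (fun i _ => by ring_nf)
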